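-- pv_equiv track=rewrite | github.com/AP-MI-2021/lab-4-BogdanRulea | main.py | AfisareNumereSuperprime
-- ===== SOURCE A (Python) =====
-- def is_prime(numar : int):
--     if numar < 2:
--         return False
--     if numar == 2:
--         return True
--
--     for i in range(3, numar//2 + 1):
--         if numar % i == 0:
--             return False
--
--     return True
--
-- def AfisareNumereSuperprime(lst : list[int]):
--     lista_finala = []
--     for numar in lst:
--         if numar > 0:
--             gasit = 1 # presupun ca numarul verificat este superprim
--             numar1 = numar
--             while numar1 > 0:
--                 if is_prime(numar1) == False: #verific daca numarul nu este prim
--                     gasit = 0  #daca nu este prim inseamna ca nici numarul nu este superprim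
--                 numar1 //=10
--
--             if gasit == 1:
--                 lista_finala.append(numar)   #daca numarul este superprim il adaug in lista
--
--     return lista_finala
-- ===== SOURCE B (Python) =====
-- def _is_prime(n):
--     # sqrt-bounded trial division (A scans all the way to n//2)
--     if n < 2:
--         return False
--     d = 2
--     while d * d <= n:
--         if n % d == 0:
--             return False
--         d += 1
--     return True
--
-- def AfisareNumereSuperprime(lst):
--     out = []
--     for n in lst:
--         # walk the truncation chain, stopping at the first non-prime
--         m = n
--         while m > 0 and _is_prime(m):
--             m //= 10
--         if n > 0 and m == 0:
--             out.append(n)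
--     return out
-- ===== Notes on version B (the rewrite author's own statement) =====
-- stated objective: alternative
-- what changed: B walks each number's truncation chain in one fused while-loop that exits at the first non-prime (A walks the whole chain with a flag), and tests primality by sqrt-bounded trial division (d*d<=n) instead of A's scan of the whole range 3..n//2; B also fixes A's off-by-one that makes is_prime(4) return True.
-- intended difference: On lists containing a positive number whose decimal truncation chain consists only of primes and the number 4, with 4 actually occurring (e.g. 4, 43, 47, 431), A includes that number in the result because its is_prime loop range(3, n//2+1) is empty for n=4 and so calls 4 prime, while B omits it; B's value is intended since 4 is not prime and such numbers are not superprime. — e.g. on AfisareNumereSuperprime([43]): A returns [43], B returns []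
import Mathlib
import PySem

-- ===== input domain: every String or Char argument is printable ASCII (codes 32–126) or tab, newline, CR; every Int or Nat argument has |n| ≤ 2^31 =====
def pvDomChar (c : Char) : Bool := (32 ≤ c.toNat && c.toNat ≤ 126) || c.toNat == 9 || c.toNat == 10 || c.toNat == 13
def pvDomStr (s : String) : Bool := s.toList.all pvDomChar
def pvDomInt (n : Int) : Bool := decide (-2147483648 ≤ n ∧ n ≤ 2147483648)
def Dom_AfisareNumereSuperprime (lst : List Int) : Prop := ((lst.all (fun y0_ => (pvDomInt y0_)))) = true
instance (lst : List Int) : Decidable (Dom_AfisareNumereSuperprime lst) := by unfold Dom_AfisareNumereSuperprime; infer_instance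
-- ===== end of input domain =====

-- B replaces A's flag-based exhaustive truncation walk (trial division up to n//2) by a fused
-- while-loop with early exit and a sqrt-bounded (d*d <= n) prime test; B thereby also fixes A's
-- off-by-one that makes is_prime(4) return True (see D_ below).

-- ===== PORT A =====
-- for i in range(3, numar//2 + 1): ported as an index recursion (range is a lazy iterator)
def isPrimeA_loop (numar i stop : Int) : Bool :=
  if i < stop then
    (if PySem.Int.mod numar i == 0 then false else isPrimeA_loop numar (i + 1) stop)
  else true
termination_by (stop - i).toNat
decreasing_by omega

def isPrimeA (numar : Int) : Bool :=
  if numar < 2 then false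
  else if numar == 2 then true
  else isPrimeA_loop numar 3 (PySem.Int.floordiv numar 2 + 1)

def whileA (numar1 gasit : Int) : Int :=
  if numar1 > 0 then
    whileA (PySem.Int.floordiv numar1 10) (if isPrimeA numar1 == false then 0 else gasit)
  else gasit
termination_by numar1.toNat
decreasing_by
  rename_i h
  rw [PySem.Int.floordiv_eq_ediv_of_pos (by norm_num)]
  omega

def goA (acc : List Int) : List Int → List Int
  | [] => acc
  | numar :: rest =>
      goA (if numar > 0 then
             (if whileA numar 1 == 1 then acc ++ [numar] else acc)
           else acc) rest

def AfisareNumereSuperprime (lst : List Int) : List Int := goA [] lst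

-- ===== PORT B =====
def trialB (n d : Int) : Bool :=
  if d * d ≤ n then
    (if PySem.Int.mod n d == 0 then false else trialB n (d + 1))
  else true
termination_by (n + 2 - d).toNat
decreasing_by
  have h1 : 0 ≤ d * d := mul_self_nonneg d
  have h2 : d ≤ d * d ∨ d ≤ 0 := by
    by_cases hh : d ≤ 0
    · right; exact hh
    · left; nlinarith [mul_self_nonneg d]
  omega

def isPrimeB (n : Int) : Bool := if n < 2 then false else trialB n 2

def chainB (m : Int) : Int :=
  if m > 0 && isPrimeB m then chainB (PySem.Int.floordiv m 10) else m
termination_by m.toNat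
decreasing_by
  rename_i h
  simp only [Bool.and_eq_true, decide_eq_true_eq] at h
  rw [PySem.Int.floordiv_eq_ediv_of_pos (by norm_num)]
  omega

def goB (acc : List Int) : List Int → List Int
  | [] => acc
  | n :: rest => goB (if n > 0 && chainB n == 0 then acc ++ [n] else acc) rest

def AfisareNumereSuperprime_alt (lst : List Int) : List Int := goB [] lst

-- ===== PRECONDITION & SPEC =====
-- spec-level helper for D_: the decimal truncation chain n, n/10, n/100, …
def pvChain (n : ℕ) : List ℕ :=
  if n = 0 then [] else n :: pvChain (n / 10)
termination_by n
decreasing_by omega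

-- A's is_prime loop range(3, n//2+1) is empty for n=4, so A calls 4 prime: on lists containing a
-- positive number whose truncation chain consists only of primes and the number 4, with 4 occurring
-- (4, 43, 47, 431, …), A includes that number in the result and B omits it; B's value is the
-- intended one since 4 is not prime, so such numbers are not superprime.
def D_AfisareNumereSuperprime (lst : List Int) : Prop :=
  ∃ n ∈ lst, 0 < n ∧ (∀ m ∈ pvChain n.toNat, Nat.Prime m ∨ m = 4) ∧ 4 ∈ pvChain n.toNat
instance (lst : List Int) : Decidable (D_AfisareNumereSuperprime lst) := by
  unfold D_AfisareNumereSuperprime; infer_instance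

def Spec_AfisareNumereSuperprime (lst : List Int) (out : List Int) : Prop :=
  ¬ D_AfisareNumereSuperprime lst → out = AfisareNumereSuperprime_alt lst
instance (lst : List Int) (out : List Int) : Decidable (Spec_AfisareNumereSuperprime lst out) := by
  unfold Spec_AfisareNumereSuperprime; infer_instance

def pvDiffWitness_AfisareNumereSuperprime : List Int := [43]
def pvDiffWitnessOut_AfisareNumereSuperprime : (List Int) × (List Int) := ([43], [])

-- ===== CLAIM (what is proved, stated in full; the proofs are below) =====
def Claim_unchanged_AfisareNumereSuperprime : Prop :=
  ∀ (lst : List Int), Dom_AfisareNumereSuperprime lst →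
    Spec_AfisareNumereSuperprime lst (AfisareNumereSuperprime lst)
def Claim_changed_AfisareNumereSuperprime : Prop :=
  Dom_AfisareNumereSuperprime (pvDiffWitness_AfisareNumereSuperprime) ∧
  D_AfisareNumereSuperprime (pvDiffWitness_AfisareNumereSuperprime) ∧
  AfisareNumereSuperprime (pvDiffWitness_AfisareNumereSuperprime) = pvDiffWitnessOut_AfisareNumereSuperprime.1 ∧
  AfisareNumereSuperprime_alt (pvDiffWitness_AfisareNumereSuperprime) = pvDiffWitnessOut_AfisareNumereSuperprime.2 ∧
  pvDiffWitnessOut_AfisareNumereSuperprime.1 ≠ pvDiffWitnessOut_AfisareNumereSuperprime.2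
def Claim_exact_AfisareNumereSuperprime : Prop :=
  ∀ (lst : List Int), Dom_AfisareNumereSuperprime lst → D_AfisareNumereSuperprime lst →
    AfisareNumereSuperprime lst ≠ AfisareNumereSuperprime_alt lst

-- ===== LEMMAS AND PROOFS =====

lemma isPrimeA_loop_iff (numar i stop : Int) :
    isPrimeA_loop numar i stop = true ↔
      ∀ j : Int, i ≤ j → j < stop → PySem.Int.mod numar j ≠ 0 := by
  fun_induction isPrimeA_loop numar i stop with
  | case1 i hlt hmod0 =>
    simp only [beq_iff_eq] at hmod0
    constructor
    · intro hF; exact absurd hF (by simp)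
    · intro hall; exact absurd hmod0 (hall i le_rfl hlt)
  | case2 i hlt hmod0 ih =>
    simp only [beq_iff_eq] at hmod0
    rw [ih]
    constructor
    · intro hall j hj hjs
      rcases eq_or_lt_of_le hj with heq | hlt'
      · subst heq; exact hmod0
      · exact hall j (by omega) hjs
    · intro hall j hj hjs
      exact hall j (by omega) hjs
  | case3 i hge =>
    constructor
    · intro _ j hj hjs; omega
    · intro _; rfl

-- A's prime test accepts exactly the primes together with 4
lemma isPrimeA_iff (n : Int) : isPrimeA n = true ↔ (Nat.Prime n.toNat ∨ n = 4) := by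
  unfold isPrimeA
  split
  · rename_i h
    constructor
    · intro hF; exact absurd hF (by simp)
    · rintro (hp | h4)
      · exact absurd hp.two_le (by omega)
      · omega
  · rename_i h
    split
    · rename_i h2
      simp only [beq_iff_eq] at h2
      subst h2
      simp [Nat.prime_two]
    · rename_i h2
      simp only [beq_iff_eq] at h2
      have hn3 : 3 ≤ n := by omega
      rw [isPrimeA_loop_iff]
      rw [PySem.Int.floordiv_eq_ediv_of_pos (by norm_num)]
      -- loop indices are exactly 3 ≤ j ≤ n / 2
      have hN3 : 3 ≤ n.toNat := by omega
      constructor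
      · intro hall
        by_cases h4 : n = 4
        · right; exact h4
        left
        by_contra hnp
        -- composite: use the cofactor of the least prime factor
        set N := n.toNat with hN
        have hne1 : N ≠ 1 := by omega
        have hpp : (N.minFac).Prime := Nat.minFac_prime hne1
        have hdvd : N.minFac ∣ N := Nat.minFac_dvd N
        have hle : N.minFac ≤ N / N.minFac := Nat.minFac_le_div (by omega) hnp
        set b := N / N.minFac with hb
        have hbdvd : b ∣ N := Nat.div_dvd_of_dvd hdvd
        have hmul : N.minFac * b = N := Nat.mul_div_cancel' hdvd
        have h2p : 2 ≤ N.minFac := hpp.two_le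
        have hble : b ≤ N / 2 := Nat.div_le_div_left h2p (by norm_num)
        have hb3 : 3 ≤ b := by
          by_contra hlt
          have hm2 : N.minFac = 2 := by omega
          have hb2 : b = 2 := by omega
          rw [hm2, hb2] at hmul
          omega
        have hbn : (b : Int) ≤ n / 2 := by
          have : ((N / 2 : ℕ) : Int) = n / 2 := by omega
          omega
        apply hall (b : Int) (by omega) (by omega)
        rw [PySem.Int.mod_eq_zero_iff_dvd]
        have hdint : (b : Int) ∣ (N : Int) := Int.natCast_dvd_natCast.mpr hbdvd
        have hNn : (N : Int) = n := by omega
        rwa [hNn] at hdint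
      · rintro hP i hi3' hilt hmod
        have hdvd : i ∣ n := (PySem.Int.mod_eq_zero_iff_dvd n i).mp hmod
        rcases hP with hp | h4
        · have hi3 : 3 ≤ i := hi3'
          have hile : i ≤ n / 2 := by omega
          have hiN : (i.toNat : Int) = i := by omega
          have hdN : i.toNat ∣ n.toNat := by
            rw [← Int.natCast_dvd_natCast]
            have : (n.toNat : Int) = n := by omega
            rw [hiN, this]; exact hdvd
          rcases hp.eq_one_or_self_of_dvd _ hdN with h1 | hs
          · omega
          · -- i = n, but i ≤ n/2 < n
            omega
        · subst h4
          -- range(3, 3) is empty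
          omega

-- ===== (B) trial division up to sqrt =====
lemma trialB_iff (n d : Int) (hd : 0 ≤ d) :
    trialB n d = true ↔ ∀ i : Int, d ≤ i → i * i ≤ n → PySem.Int.mod n i ≠ 0 := by
  fun_induction trialB n d with
  | case1 d hle hmod0 =>
    simp only [beq_iff_eq] at hmod0
    constructor
    · intro hF; exact absurd hF (by simp)
    · intro hall
      exact absurd hmod0 (hall d le_rfl hle)
  | case2 d hle hmod0 ih =>
    simp only [beq_iff_eq] at hmod0
    rw [ih (by omega)]
    constructor
    · intro hall i hi hii
      rcases eq_or_lt_of_le hi with heq | hlt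
      · subst heq; exact hmod0
      · exact hall i (by omega) hii
    · intro hall i hi hii
      exact hall i (by omega) hii
  | case3 d hgt =>
    constructor
    · intro _ i hi hii
      exfalso
      have : d * d ≤ i * i := mul_le_mul hi hi hd (by omega)
      omega
    · intro _; rfl

-- B's prime test accepts exactly the primes
lemma isPrimeB_iff (n : Int) : isPrimeB n = true ↔ Nat.Prime n.toNat := by
  unfold isPrimeB
  split
  · rename_i h
    constructor
    · intro hF; exact absurd hF (by simp)
    · intro hp; exact absurd hp.two_le (by omega)
  · rename_i h
    have hn2 : 2 ≤ n := by omega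
    rw [trialB_iff n 2 (by norm_num)]
    rw [Nat.prime_def_le_sqrt]
    constructor
    · intro hall
      refine ⟨by omega, fun m hm hsq => ?_⟩
      intro hdvd
      rw [Nat.le_sqrt] at hsq
      have h1 : (2 : Int) ≤ (m : Int) := by exact_mod_cast hm
      have h2 : (m : Int) * (m : Int) ≤ n := by
        have : ((m * m : ℕ) : Int) ≤ ((n.toNat : ℕ) : Int) := by exact_mod_cast hsq
        push_cast at this
        omega
      apply hall (m : Int) h1 h2
      rw [PySem.Int.mod_eq_zero_iff_dvd]
      have : ((m : Int)) ∣ ((n.toNat : ℕ) : Int) := Int.natCast_dvd_natCast.mpr hdvd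
      have hNn : ((n.toNat : ℕ) : Int) = n := by omega
      rwa [hNn] at this
    · rintro ⟨_, hall⟩ i hi hii
      intro hmod
      have hdvd : i ∣ n := (PySem.Int.mod_eq_zero_iff_dvd n i).mp hmod
      have hiN : (i.toNat : Int) = i := by omega
      apply hall i.toNat (by omega) ?_ ?_
      · rw [Nat.le_sqrt]
        have : (i.toNat : Int) * (i.toNat : Int) ≤ ((n.toNat : ℕ) : Int) := by
          rw [hiN]; omega
        exact_mod_cast this
      · rw [← Int.natCast_dvd_natCast]
        have : (n.toNat : Int) = n := by omega
        rw [hiN, this]; exact hdvd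

lemma pvChain_zero : pvChain 0 = [] := by rw [pvChain]; rfl

lemma pvChain_pos (n : ℕ) (h : n ≠ 0) : pvChain n = n :: pvChain (n / 10) := by
  rw [pvChain]; simp [h]

lemma pvChain_43 : pvChain 43 = [43, 4] := by
  rw [pvChain_pos 43 (by norm_num)]
  norm_num
  rw [pvChain_pos 4 (by norm_num)]
  norm_num [pvChain_zero]

-- A's chain walk returns the flag iff every truncation passes A's prime test
lemma whileA_eq (n g : Int) :
    whileA n g = if (∀ m ∈ pvChain n.toNat, Nat.Prime m ∨ m = 4) then g else 0 := by
  fun_induction whileA n g with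
  | case1 n g hpos ih =>
    have hne : n.toNat ≠ 0 := by omega
    have hdiv : (PySem.Int.floordiv n 10).toNat = n.toNat / 10 := by
      rw [PySem.Int.floordiv_eq_ediv_of_pos (by norm_num)]; omega
    simp only [dite_eq_ite] at ih
    rw [ih, pvChain_pos _ hne]
    have h4 : (n = 4) ↔ (n.toNat = 4) := by omega
    by_cases hp : isPrimeA n = true
    · have hpn : Nat.Prime n.toNat ∨ n.toNat = 4 := by
        rcases (isPrimeA_iff n).mp hp with h | h
        · left; exact h
        · right; omega
      simp only [hp, beq_iff_eq, hdiv]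
      norm_num
      split <;> split <;> simp_all
    · have hb : (isPrimeA n == false) = true := by
        rw [Bool.not_eq_true] at hp; simp [hp]
      have hpn : ¬ (Nat.Prime n.toNat ∨ n.toNat = 4) := by
        intro hc
        apply hp
        rw [isPrimeA_iff]
        rcases hc with h | h
        · left; exact h
        · right; omega
      simp only [hb, if_true, ite_self, hdiv]
      rw [if_neg]
      intro hall
      exact hpn (hall n.toNat (by simp))
  | case2 n g hpos =>
    have : n.toNat = 0 := by omega
    rw [this, pvChain_zero]
    simp

-- B's chain walk reaches 0 iff every truncation is prime
lemma chainB_zero_iff (n : Int) (hn : 0 ≤ n) :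
    chainB n = 0 ↔ ∀ m ∈ pvChain n.toNat, Nat.Prime m := by
  fun_induction chainB n with
  | case1 m hguard ih =>
    simp only [Bool.and_eq_true, decide_eq_true_eq] at hguard
    obtain ⟨hpos, hprime⟩ := hguard
    have hne : m.toNat ≠ 0 := by omega
    have hdiv : (PySem.Int.floordiv m 10).toNat = m.toNat / 10 := by
      rw [PySem.Int.floordiv_eq_ediv_of_pos (by norm_num)]; omega
    rw [ih (by rw [PySem.Int.floordiv_eq_ediv_of_pos (by norm_num)]; omega),
        pvChain_pos _ hne, hdiv]
    have hpm : Nat.Prime m.toNat := (isPrimeB_iff m).mp hprime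
    simp [hpm]
  | case2 m hguard =>
    simp only [Bool.and_eq_true, decide_eq_true_eq, not_and] at hguard
    by_cases hm : 0 < m
    · have hnp : ¬ Nat.Prime m.toNat := by
        intro hc
        exact absurd ((isPrimeB_iff m).mpr hc) (by simpa using hguard hm)
      have hne : m.toNat ≠ 0 := by omega
      rw [pvChain_pos _ hne]
      constructor
      · intro h0; omega
      · intro hall; exact absurd (hall m.toNat (by simp)) hnp
    · have : m = 0 := by omega
      subst this
      simp [pvChain_zero]

def pA (n : Int) : Bool := decide (n > 0) && (whileA n 1 == 1)
def pB (n : Int) : Bool := decide (n > 0) && (chainB n == 0)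

lemma pA_iff (n : Int) : pA n = true ↔ 0 < n ∧ ∀ m ∈ pvChain n.toNat, Nat.Prime m ∨ m = 4 := by
  simp only [pA, Bool.and_eq_true, decide_eq_true_eq, beq_iff_eq, whileA_eq]
  constructor
  · rintro ⟨h1, h2⟩
    refine ⟨h1, ?_⟩
    by_contra hc
    simp [hc] at h2
  · rintro ⟨h1, h2⟩
    exact ⟨h1, by rw [if_pos h2]⟩

lemma pB_iff (n : Int) : pB n = true ↔ 0 < n ∧ ∀ m ∈ pvChain n.toNat, Nat.Prime m := by
  simp only [pB, Bool.and_eq_true, decide_eq_true_eq, beq_iff_eq]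
  constructor
  · rintro ⟨h1, h2⟩
    exact ⟨h1, (chainB_zero_iff n (by omega)).mp h2⟩
  · rintro ⟨h1, h2⟩
    exact ⟨h1, (chainB_zero_iff n (by omega)).mpr h2⟩

lemma goA_eq_filter (l : List Int) (acc : List Int) : goA acc l = acc ++ l.filter pA := by
  induction l generalizing acc with
  | nil => simp [goA]
  | cons n rest ih =>
    simp only [goA, ih, List.filter_cons, pA]
    by_cases h1 : n > 0
    · by_cases h2 : whileA n 1 == 1 <;> simp [h1, h2]
    · simp [h1]

lemma goB_eq_filter (l : List Int) (acc : List Int) : goB acc l = acc ++ l.filter pB := by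
  induction l generalizing acc with
  | nil => simp [goB]
  | cons n rest ih =>
    simp only [goB, ih, List.filter_cons, pB]
    by_cases h1 : n > 0
    · by_cases h2 : chainB n == 0 <;> simp [h1, h2]
    · simp [h1]

lemma pA_eq_pB_of_not_bad (n : Int)
    (h : ¬ (0 < n ∧ (∀ m ∈ pvChain n.toNat, Nat.Prime m ∨ m = 4) ∧ 4 ∈ pvChain n.toNat)) :
    pA n = pB n := by
  by_cases hb : pB n = true
  · obtain ⟨h1, h2⟩ := (pB_iff n).mp hb
    rw [hb]
    exact (pA_iff n).mpr ⟨h1, fun m hm => Or.inl (h2 m hm)⟩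
  · by_cases ha : pA n = true
    · exfalso
      obtain ⟨h1, h2⟩ := (pA_iff n).mp ha
      apply h
      refine ⟨h1, h2, ?_⟩
      by_contra h4
      apply hb
      refine (pB_iff n).mpr ⟨h1, fun m hm => ?_⟩
      rcases h2 m hm with hp | hp
      · exact hp
      · exact absurd (hp ▸ hm) h4
    · rw [Bool.not_eq_true] at ha hb
      rw [ha, hb]

lemma pB_imp_pA (n : Int) : pB n = true → pA n = true := by
  intro h
  obtain ⟨h1, h2⟩ := (pB_iff n).mp h
  exact (pA_iff n).mpr ⟨h1, fun m hm => Or.inl (h2 m hm)⟩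

lemma countP_strict {α : Type} (p q : α → Bool) (l : List α)
    (hmono : ∀ x ∈ l, p x = true → q x = true)
    (hex : ∃ x ∈ l, q x = true ∧ p x = false) :
    l.countP p < l.countP q := by
  induction l with
  | nil => simp at hex
  | cons x t ih =>
    rw [List.countP_cons, List.countP_cons]
    obtain ⟨y, hy, hyq, hyp⟩ := hex
    rcases List.mem_cons.mp hy with rfl | hyt
    · have hle : t.countP p ≤ t.countP q :=
        List.countP_mono_left (fun a ha => hmono a (List.mem_cons_of_mem _ ha))
      simp [hyq, hyp]; omega
    · have hlt : t.countP p < t.countP q :=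
        ih (fun a ha => hmono a (List.mem_cons_of_mem _ ha)) ⟨y, hyt, hyq, hyp⟩
      have hhead : (if p x = true then 1 else 0) ≤ (if q x = true then 1 else 0) := by
        have hx := hmono x (by simp)
        cases hpx : p x <;> cases hqx : q x <;> simp_all
      omega

-- ===== VERDICT (by name: the statement is the Claim_ definition above) =====
theorem AfisareNumereSuperprime_spec : Claim_unchanged_AfisareNumereSuperprime := by
  intro lst _ hnd
  unfold AfisareNumereSuperprime AfisareNumereSuperprime_alt
  rw [goA_eq_filter, goB_eq_filter, List.nil_append, List.nil_append]
  apply List.filter_congr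
  intro x hx
  apply pA_eq_pB_of_not_bad
  intro hbad
  exact hnd ⟨x, hx, hbad⟩

theorem AfisareNumereSuperprime_changed : Claim_changed_AfisareNumereSuperprime := by
  unfold Claim_changed_AfisareNumereSuperprime
  have ht : Int.toNat 43 = 43 := rfl
  refine ⟨by decide, ?_, ?_, ?_, by decide⟩
  · refine ⟨43, by simp [pvDiffWitness_AfisareNumereSuperprime], by norm_num, ?_, ?_⟩
    · rw [ht, pvChain_43]
      intro m hm
      simp only [List.mem_cons, List.not_mem_nil, or_false] at hm
      rcases hm with rfl | rfl
      · left; norm_num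
      · right; rfl
    · rw [ht, pvChain_43]; simp
  · show AfisareNumereSuperprime [43] = [43]
    unfold AfisareNumereSuperprime
    rw [goA_eq_filter, List.nil_append]
    have hpa : pA 43 = true := by
      rw [pA_iff]
      refine ⟨by norm_num, ?_⟩
      rw [ht, pvChain_43]
      intro m hm
      simp only [List.mem_cons, List.not_mem_nil, or_false] at hm
      rcases hm with rfl | rfl
      · left; norm_num
      · right; rfl
    simp [hpa]
  · show AfisareNumereSuperprime_alt [43] = []
    unfold AfisareNumereSuperprime_alt
    rw [goB_eq_filter, List.nil_append]
    have hpb : pB 43 = false := by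
      rw [Bool.eq_false_iff]
      intro hc
      have hall := ((pB_iff 43).mp hc).2
      rw [ht, pvChain_43] at hall
      have := hall 4 (by simp)
      exact absurd this (by norm_num)
    simp [hpb]

theorem AfisareNumereSuperprime_tight : Claim_exact_AfisareNumereSuperprime := by
  intro lst _ hd heq
  obtain ⟨n, hn, h1, h2, h3⟩ := hd
  have hpa : pA n = true := (pA_iff n).mpr ⟨h1, h2⟩
  have hpb : pB n = false := by
    rw [Bool.eq_false_iff]
    intro hc
    have := ((pB_iff n).mp hc).2 4 h3
    exact absurd this (by norm_num)
  have hlt : lst.countP pB < lst.countP pA :=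
    countP_strict pB pA lst (fun a _ => pB_imp_pA a) ⟨n, hn, hpa, hpb⟩
  have hA : AfisareNumereSuperprime lst = lst.filter pA := by
    unfold AfisareNumereSuperprime; rw [goA_eq_filter, List.nil_append]
  have hB : AfisareNumereSuperprime_alt lst = lst.filter pB := by
    unfold AfisareNumereSuperprime_alt; rw [goB_eq_filter, List.nil_append]
  rw [hA, hB] at heq
  have := congrArg List.length heq
  rw [← List.countP_eq_length_filter, ← List.countP_eq_length_filter] at this
  omega
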